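-- pv_equiv track=rewrite | github.com/blegloannec/CodeProblems | Rosalind/LREP.py | dfs
-- ===== SOURCE A (Python) =====
-- def dfs(S,T,k,u,w=''):
--     if u not in T:  # leaf
--         return 1,''
--     l,b = 0,''
--     for (v,i,j) in T[u]:
--         lv,bv = dfs(S,T,k,v,w+S[i:i+j])
--         l += lv
--         if len(bv)>len(b):
--             b = bv
--     if l>=k and len(w)>len(b):
--         b = w
--     return l,b
-- ===== SOURCE B (Python) =====
-- def dfs(S, T, k, u, w=''):
--     # Two separate pure recursions over the tree: one counts leaves, the other
--     # builds the best label RELATIVE to each node (None = no node with >= k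
--     # leaves below); the caller's prefix w is attached once at the end.
--
--     def leaves(v):
--         if v not in T:
--             return 1
--         return sum(leaves(c) for (c, _, _) in T[v])
--
--     def best(v):
--         if v not in T:
--             return None
--         b = None
--         for (c, i, j) in T[v]:
--             r = best(c)
--             if r is not None:
--                 cand = S[i:i + j] + r
--                 if b is None or len(cand) > len(b):
--                     b = cand
--         if b is None and leaves(v) >= k:
--             b = ''
--         return b
--
--     r = best(u)
--     return (leaves(u), '' if r is None else w + r)
-- ===== Notes on version B (the rewrite author's own statement) =====
-- stated objective: alternative
-- what changed: Replaces A's single prefix-accumulating recursion (absolute labels with '' as sentinel) by two independent pure recursions - a leaf counter and a best-label function returning the label relative to each node as Optional[str] - with the caller's prefix attached once at the top; Pre_ excludes only inputs on which A raises (a reachable non-triple edge -> ValueError, a reachable cycle -> RecursionError).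
import Mathlib
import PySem

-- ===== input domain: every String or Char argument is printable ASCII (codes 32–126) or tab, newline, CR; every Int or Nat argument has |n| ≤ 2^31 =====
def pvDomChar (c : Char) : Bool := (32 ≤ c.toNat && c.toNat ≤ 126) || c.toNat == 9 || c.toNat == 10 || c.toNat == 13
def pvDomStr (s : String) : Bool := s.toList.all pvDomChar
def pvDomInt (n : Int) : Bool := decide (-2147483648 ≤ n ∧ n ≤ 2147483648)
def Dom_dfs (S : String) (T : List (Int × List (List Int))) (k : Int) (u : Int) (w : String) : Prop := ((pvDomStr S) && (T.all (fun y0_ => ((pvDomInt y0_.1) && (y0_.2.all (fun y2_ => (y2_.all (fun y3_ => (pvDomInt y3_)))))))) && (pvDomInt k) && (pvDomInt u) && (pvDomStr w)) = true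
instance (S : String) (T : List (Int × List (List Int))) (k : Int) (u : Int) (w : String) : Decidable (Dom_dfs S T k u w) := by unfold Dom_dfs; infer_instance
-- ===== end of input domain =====

-- B replaces A's single prefix-accumulating recursion (absolute labels, '' sentinel) by two
-- independent pure recursions — a leaf counter and a best-relative-label function returning
-- Option — assembled at the top (objective: alternative).

-- ===== PORT A =====
-- A recurses with no structural bound; the port uses a fuel counter (T.length + 1 at the top
-- call), which is never exhausted when no key reachable from u lies on a cycle.
-- Strings are carried as List Char (PySem.Chars represents Python str exactly on them).
def dfsAgo (SL : List Char) (T : List (Int × List (List Int))) (k : Int) :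
    Nat → Int → List Char → Int × List Char
  | 0, _, _ => (1, [])
  | fuel+1, u, w =>
    match T.find? (fun p => p.1 == u) with
    | none => (1, [])                      -- u not in T: leaf
    | some pe =>
      -- for (v,i,j) in T[u]: recurse on w + S[i:i+j], keep l += lv and the strictly longest bv
      let r := pe.2.foldl (fun acc e =>
        let r2 := dfsAgo SL T k fuel (e.getD 0 0)
          (w ++ PySem.List.slice SL (some (e.getD 1 0)) (some (e.getD 1 0 + e.getD 2 0)))
        (acc.1 + r2.1, if acc.2.length < r2.2.length then r2.2 else acc.2))
        ((0 : Int), ([] : List Char))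
      (r.1, if k ≤ r.1 ∧ r.2.length < w.length then w else r.2)

def dfs (S : String) (T : List (Int × List (List Int))) (k : Int) (u : Int) (w : String) : Int × String :=
  let r := dfsAgo S.toList T k (T.length + 1) u w.toList
  (r.1, String.ofList r.2)

-- ===== PORT B =====
-- leaves(v): number of leaves below v (same fuel convention as A's port).
def leavesF (T : List (Int × List (List Int))) : Nat → Int → Int
  | 0, _ => 1
  | fuel+1, v =>
    match T.find? (fun p => p.1 == v) with
    | none => 1
    | some pe => pe.2.foldl (fun acc e => acc + leavesF T fuel (e.getD 0 0)) 0

-- best(v): longest label relative to v whose endpoint has ≥ k leaves, none if there is none.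
def bestF (SL : List Char) (T : List (Int × List (List Int))) (k : Int) :
    Nat → Int → Option (List Char)
  | 0, _ => none
  | fuel+1, v =>
    match T.find? (fun p => p.1 == v) with
    | none => none
    | some pe =>
      let b := pe.2.foldl (fun b e =>
        match bestF SL T k fuel (e.getD 0 0) with
        | none => b
        | some r =>
          let cand := PySem.List.slice SL (some (e.getD 1 0)) (some (e.getD 1 0 + e.getD 2 0)) ++ r
          match b with
          | none => some cand
          | some bb => if bb.length < cand.length then some cand else some bb)
        (none : Option (List Char))
      if b = none ∧ k ≤ leavesF T (fuel+1) v then some [] else b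

def dfs_alt (S : String) (T : List (Int × List (List Int))) (k : Int) (u : Int) (w : String) : Int × String :=
  (leavesF T (T.length + 1) u,
   match bestF S.toList T k (T.length + 1) u with
   | none => ""
   | some r => String.ofList (w.toList ++ r))

-- ===== PRECONDITION & SPEC =====
-- Closed-form over-approximation of the nodes A's recursion can visit from u.
def pvChildKeys (T : List (Int × List (List Int))) (v : Int) : List Int :=
  match T.find? (fun p => p.1 == v) with
  | none => []
  | some pe => pe.2.map (fun e => e.getD 0 0)

def pvExpand (T : List (Int × List (List Int))) (s : List Int) : List Int :=
  s.foldl (fun acc v => acc ++ ((pvChildKeys T v).filter (fun c => decide (c ∉ acc)))) s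

def pvReach (T : List (Int × List (List Int))) (s : List Int) : List Int :=
  (pvExpand T)^[T.length + 1] s

-- Pre_dfs excludes exactly the inputs on which the Python A raises: a node reachable from u
-- whose edge list contains an entry that is not a (child,i,j) triple (ValueError on
-- unpacking), or a key reachable from u that lies on a cycle (the recursion never
-- terminates, RecursionError).  On every input where A returns, Pre_dfs holds.
def Pre_dfs (S : String) (T : List (Int × List (List Int))) (k : Int) (u : Int) (w : String) : Prop :=
  ∀ p ∈ T, p.1 ∈ pvReach T [u] →
    (∀ e ∈ p.2, e.length = 3) ∧ p.1 ∉ pvReach T (pvChildKeys T p.1)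
instance (S : String) (T : List (Int × List (List Int))) (k : Int) (u : Int) (w : String) : Decidable (Pre_dfs S T k u w) := by unfold Pre_dfs; infer_instance

def pvWitness_dfs : String × (List (Int × List (List Int))) × Int × Int × String :=
  ("abab", [(0, [[1, 0, 2], [2, 2, 2]]), (1, [[3, 2, 2]])], 2, 0, "")

def Spec_dfs (S : String) (T : List (Int × List (List Int))) (k : Int) (u : Int) (w : String) (out : Int × String) : Prop := out = dfs_alt S T k u w
instance (S : String) (T : List (Int × List (List Int))) (k : Int) (u : Int) (w : String) (out : Int × String) : Decidable (Spec_dfs S T k u w out) := by unfold Spec_dfs; infer_instance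

-- ===== CLAIM (what is proved, stated in full; the proofs are below) =====
def Claim_equal_dfs : Prop := ∀ (S : String) (T : List (Int × List (List Int))) (k : Int) (u : Int) (w : String), Dom_dfs S T k u w → Pre_dfs S T k u w → Spec_dfs S T k u w (dfs S T k u w)

-- ===== LEMMAS AND PROOFS =====

-- A's (count, absolute label) from B's (count, relative-label option), at prefix w.
def convS (w : List Char) (p : Int × Option (List Char)) : Int × List Char :=
  (p.1, match p.2 with | none => [] | some r => w ++ r)

-- combined (leaf count, best relative label) recursion, the bridge between the two ports
def gF (SL : List Char) (T : List (Int × List (List Int))) (k : Int) :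
    Nat → Int → Int × Option (List Char)
  | 0, _ => (1, none)
  | fuel+1, v =>
    match T.find? (fun p => p.1 == v) with
    | none => (1, none)
    | some pe =>
      let q := pe.2.foldl (fun acc e =>
        let c := gF SL T k fuel (e.getD 0 0)
        let acc1 := acc.1 + c.1
        match c.2 with
        | none => (acc1, acc.2)
        | some r =>
          let cand := PySem.List.slice SL (some (e.getD 1 0)) (some (e.getD 1 0 + e.getD 2 0)) ++ r
          match acc.2 with
          | none => (acc1, some cand)
          | some b => if b.length < cand.length then (acc1, some cand) else (acc1, some b))
        ((0 : Int), (none : Option (List Char)))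
      (q.1, if q.2 = none ∧ k ≤ q.1 then some [] else q.2)

-- the child loop: A's fold over (count, absolute label) is the fold over
-- (count, relative label) transported by convS, given that every child call agrees
lemma foldl_child (SL : List Char) (w : List Char) (dA : Int → List Char → Int × List Char)
    (h : List Int → Int × Option (List Char)) (es : List (List Int))
    (H : ∀ e ∈ es, dA (e.getD 0 0)
        (w ++ PySem.List.slice SL (some (e.getD 1 0)) (some (e.getD 1 0 + e.getD 2 0)))
      = convS (w ++ PySem.List.slice SL (some (e.getD 1 0)) (some (e.getD 1 0 + e.getD 2 0)))
          (h e)) :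
    ∀ accB : Int × Option (List Char),
      es.foldl (fun acc e =>
          let r2 := dA (e.getD 0 0)
            (w ++ PySem.List.slice SL (some (e.getD 1 0)) (some (e.getD 1 0 + e.getD 2 0)))
          (acc.1 + r2.1, if acc.2.length < r2.2.length then r2.2 else acc.2)) (convS w accB)
      = convS w (es.foldl (fun acc e =>
          let c := h e
          let acc1 := acc.1 + c.1
          match c.2 with
          | none => (acc1, acc.2)
          | some r =>
            let cand := PySem.List.slice SL (some (e.getD 1 0)) (some (e.getD 1 0 + e.getD 2 0)) ++ r
            match acc.2 with
            | none => (acc1, some cand)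
            | some b => if b.length < cand.length then (acc1, some cand) else (acc1, some b)) accB) := by
  induction es with
  | nil => intro accB; rfl
  | cons e es ih =>
    intro accB
    rw [List.foldl_cons, List.foldl_cons]
    have he := H e (List.mem_cons_self ..)
    have hstep :
        (let r2 := dA (e.getD 0 0)
            (w ++ PySem.List.slice SL (some (e.getD 1 0)) (some (e.getD 1 0 + e.getD 2 0)))
         ((convS w accB).1 + r2.1,
          if (convS w accB).2.length < r2.2.length then r2.2 else (convS w accB).2))
        = convS w
          (let c := h e
           let acc1 := accB.1 + c.1
           match c.2 with
           | none => (acc1, accB.2)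
           | some r =>
             let cand := PySem.List.slice SL (some (e.getD 1 0)) (some (e.getD 1 0 + e.getD 2 0)) ++ r
             match accB.2 with
             | none => (acc1, some cand)
             | some b => if b.length < cand.length then (acc1, some cand) else (acc1, some b)) := by
      rw [he]
      rcases hres : h e with ⟨cl, cr⟩
      generalize PySem.List.slice SL (some (e.getD 1 0)) (some (e.getD 1 0 + e.getD 2 0)) = sl
      obtain ⟨lB, rB⟩ := accB
      rcases cr with _ | r
      · -- child has no candidate: its absolute label is [], never longer
        cases rB <;> simp [convS]
      · cases rB with
        | none =>
          -- current best is empty; the candidate wins unless it is empty too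
          simp only [convS]
          by_cases hlen : (0 : Nat) < (w ++ (sl ++ r)).length
          · simp [List.append_assoc]
          · have hw : w = [] := by
              simp only [List.length_append, Nat.not_lt, Nat.le_zero] at hlen
              exact List.length_eq_zero_iff.mp (by omega)
            have hsr : sl ++ r = [] := by
              simp only [List.length_append, Nat.not_lt, Nat.le_zero] at hlen
              exact List.length_eq_zero_iff.mp (by simp only [List.length_append]; omega)
            simp [hw, hsr]
        | some b =>
          simp only [convS]
          by_cases hb : b.length < sl.length + r.length
          · have hlen : (w ++ b).length < (w ++ (sl ++ r)).length := by
              simp only [List.length_append]; omega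
            simp [hb, List.append_assoc]
          · have hlen : ¬ (w ++ b).length < (w ++ (sl ++ r)).length := by
              simp only [List.length_append]; omega
            simp [hb]
    rw [hstep]
    exact ih (fun e' he' => H e' (List.mem_cons_of_mem _ he')) _

-- A's recursion is the combined recursion transported by convS, at every fuel.
lemma dfsAgo_eq_g (SL : List Char) (T : List (Int × List (List Int))) (k : Int) :
    ∀ (fuel : Nat) (v : Int) (w : List Char),
      dfsAgo SL T k fuel v w = convS w (gF SL T k fuel v) := by
  intro fuel
  induction fuel with
  | zero => intro v w; rfl
  | succ fuel ih =>
    intro v w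
    show (match T.find? (fun p => p.1 == v) with
      | none => (1, [])
      | some pe =>
        let r := pe.2.foldl (fun acc e =>
          let r2 := dfsAgo SL T k fuel (e.getD 0 0)
            (w ++ PySem.List.slice SL (some (e.getD 1 0)) (some (e.getD 1 0 + e.getD 2 0)))
          (acc.1 + r2.1, if acc.2.length < r2.2.length then r2.2 else acc.2))
          ((0 : Int), ([] : List Char))
        (r.1, if k ≤ r.1 ∧ r.2.length < w.length then w else r.2))
      = convS w (gF SL T k (fuel+1) v)
    rcases hfind : T.find? (fun p => p.1 == v) with _ | pe
    · simp only [gF, hfind]; rfl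
    · simp only [gF, hfind]
      have h0 : ((0 : Int), ([] : List Char)) = convS w ((0 : Int), (none : Option (List Char))) := rfl
      rw [h0, foldl_child SL w (dfsAgo SL T k fuel) (fun e => gF SL T k fuel (e.getD 0 0)) pe.2
        (fun e _ => ih (e.getD 0 0) _) (0, none)]
      generalize (pe.2.foldl (fun acc e =>
          let c := gF SL T k fuel (e.getD 0 0)
          let acc1 := acc.1 + c.1
          match c.2 with
          | none => (acc1, acc.2)
          | some r =>
            let cand := PySem.List.slice SL (some (e.getD 1 0)) (some (e.getD 1 0 + e.getD 2 0)) ++ r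
            match acc.2 with
            | none => (acc1, some cand)
            | some b => if b.length < cand.length then (acc1, some cand) else (acc1, some b))
          ((0 : Int), (none : Option (List Char)))) = q
      obtain ⟨pl, pr⟩ := q
      rcases pr with _ | b
      · by_cases hk : k ≤ pl
        · cases w with
          | nil => simp [convS, hk]
          | cons c w' => simp [convS, hk]
        · simp [convS, hk]
      · simp [convS]

-- the combined recursion splits into B's two recursions
lemma gF_split (SL : List Char) (T : List (Int × List (List Int))) (k : Int) :
    ∀ (fuel : Nat) (v : Int),
      gF SL T k fuel v = (leavesF T fuel v, bestF SL T k fuel v) := by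
  intro fuel
  induction fuel with
  | zero => intro v; rfl
  | succ fuel ih =>
    intro v
    rcases hfind : T.find? (fun p => p.1 == v) with _ | pe
    · simp only [gF, leavesF, bestF, hfind]
    · simp only [gF, leavesF, bestF, hfind]
      have hfold : ∀ (es : List (List Int)) (a1 : Int) (a2 : Option (List Char)),
          es.foldl (fun acc e =>
            let c := gF SL T k fuel (e.getD 0 0)
            let acc1 := acc.1 + c.1
            match c.2 with
            | none => (acc1, acc.2)
            | some r =>
              let cand := PySem.List.slice SL (some (e.getD 1 0)) (some (e.getD 1 0 + e.getD 2 0)) ++ r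
              match acc.2 with
              | none => (acc1, some cand)
              | some b => if b.length < cand.length then (acc1, some cand) else (acc1, some b))
            (a1, a2)
          = (es.foldl (fun acc e => acc + leavesF T fuel (e.getD 0 0)) a1,
             es.foldl (fun b e =>
               match bestF SL T k fuel (e.getD 0 0) with
               | none => b
               | some r =>
                 let cand := PySem.List.slice SL (some (e.getD 1 0)) (some (e.getD 1 0 + e.getD 2 0)) ++ r
                 match b with
                 | none => some cand
                 | some bb => if bb.length < cand.length then some cand else some bb) a2) := by
        intro es
        induction es with
        | nil => intro a1 a2; rfl
        | cons e es ihe =>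
          intro a1 a2
          rw [List.foldl_cons, List.foldl_cons, List.foldl_cons, ih (e.getD 0 0)]
          rcases hb : bestF SL T k fuel (e.getD 0 0) with _ | r
          · dsimp only; exact ihe _ _
          · rcases a2 with _ | bb
            · dsimp only; exact ihe _ _
            · dsimp only
              by_cases hlen : bb.length <
                (PySem.List.slice SL (some (e.getD 1 0)) (some (e.getD 1 0 + e.getD 2 0)) ++ r).length
              · rw [if_pos hlen, if_pos hlen]; exact ihe _ _
              · rw [if_neg hlen, if_neg hlen]; exact ihe _ _
      rw [hfold]

-- ===== VERDICT (by name: the statement is the Claim_ definition above) =====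
theorem dfs_spec : Claim_equal_dfs := by
  intro S T k u w _hDom _hPre
  unfold Spec_dfs dfs dfs_alt
  rw [dfsAgo_eq_g S.toList T k (T.length + 1) u w.toList,
      gF_split S.toList T k (T.length + 1) u]
  rcases bestF S.toList T k (T.length + 1) u with _ | r
  · rfl
  · rfl
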